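-- pv_equiv track=rewrite | github.com/sahiti3636/HI-LABS_AGENTIC-AI | procedure_engine.py | _select_sql_template
-- ===== SOURCE A (Python) =====
-- def _select_sql_template(procedure: dict, params: dict) -> str:
--     """
--     Selects the correct SQL template variant based on provided parameters.
--
--     Rules:
--         - If all params are 'ALL', use the all_states or all_markets variant
--         - Otherwise use the most specific variant available
--
--     Args:
--         procedure: The procedure definition dict.
--         params:    Parameter dict e.g. {"state": "KS", "month": "ALL"}
--
--     Returns:
--         SQL string with parameters substituted.
--     """
--     templates = procedure["sql_template"]
--     state = params.get("state", "ALL")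
--     month = params.get("month", "ALL")
--
--     # Select variant
--     if state == "ALL":
--         if "all_states" in templates:
--             sql = templates["all_states"]
--         elif "all_markets" in templates:
--             sql = templates["all_markets"]
--         elif "all_states_market" in templates:
--             sql = templates["all_states_market"]
--         else:
--             # Fall back to first available template
--             sql = list(templates.values())[0]
--     elif month != "ALL" and "by_state_and_month" in templates:
--         sql = templates["by_state_and_month"]
--     elif "by_state_all_months" in templates:
--         sql = templates["by_state_all_months"]
--     elif "by_state" in templates:
--         sql = templates["by_state"]
--     elif "market_level_by_state" in templates:
--         sql = templates["market_level_by_state"]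
--     elif "ro_level_by_state" in templates:
--         sql = templates["ro_level_by_state"]
--     else:
--         sql = list(templates.values())[0]
--
--     # Substitute parameters
--     for key, value in params.items():
--         sql = sql.replace(f"{{{key}}}", value)
--
--     return sql
-- ===== SOURCE B (Python) =====
-- def _select_sql_template(procedure: dict, params: dict) -> str:
--     """Pick the template by one min-rank pass over the template dict (priority table), then substitute params."""
--     templates = procedure["sql_template"]
--     state = params.get("state", "ALL")
--     month = params.get("month", "ALL")
--
--     if state == "ALL":
--         rank = {"all_states": 0, "all_markets": 1, "all_states_market": 2}
--     else:
--         rank = {"by_state_all_months": 1, "by_state": 2,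
--                 "market_level_by_state": 3, "ro_level_by_state": 4}
--         if month != "ALL":
--             rank["by_state_and_month"] = 0
--
--     best = None
--     for key, text in templates.items():
--         r = rank.get(key)
--         if r is not None and (best is None or r < best[0]):
--             best = (r, text)
--
--     sql = best[1] if best is not None else next(iter(templates.values()))
--
--     for key, value in params.items():
--         sql = sql.replace("{" + key + "}", value)
--     return sql
-- ===== Notes on version B (the rewrite author's own statement) =====
-- stated objective: alternative
-- what changed: The key-by-key membership cascade over hard-coded template names is replaced by a priority table (name -> rank) and a single min-rank scan over the template dict entries keeping the earliest best match; the first-value fallback and the substitution loop are unchanged.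
-- outside the precondition, e.g. on _select_sql_template({'sql_template': {}}, {'state': 'KS'}): A raises IndexError, B raises StopIteration
import Mathlib
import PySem

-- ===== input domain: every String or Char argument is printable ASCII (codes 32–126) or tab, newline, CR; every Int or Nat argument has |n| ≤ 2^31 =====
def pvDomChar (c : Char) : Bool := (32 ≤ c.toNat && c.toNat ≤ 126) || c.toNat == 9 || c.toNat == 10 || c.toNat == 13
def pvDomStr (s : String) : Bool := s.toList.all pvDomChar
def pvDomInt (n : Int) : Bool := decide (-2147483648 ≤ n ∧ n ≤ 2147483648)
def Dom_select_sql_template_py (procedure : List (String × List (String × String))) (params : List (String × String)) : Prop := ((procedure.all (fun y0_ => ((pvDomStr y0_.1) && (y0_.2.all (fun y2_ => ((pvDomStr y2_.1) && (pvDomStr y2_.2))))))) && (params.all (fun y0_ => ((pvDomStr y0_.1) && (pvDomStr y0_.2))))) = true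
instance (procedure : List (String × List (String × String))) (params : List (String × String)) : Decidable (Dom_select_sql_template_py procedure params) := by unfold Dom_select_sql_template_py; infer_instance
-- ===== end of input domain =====

-- B replaces the if-elif membership cascade with a priority table and ONE min-rank pass over
-- the template entries; the parameter-substitution loop is shared verbatim by both ports.

-- ===== PORT A =====
-- first-match association-list lookup, = Python dict lookup on the List-encoded dict
def pvLookup (d : List (String × String)) (k : String) : Option String :=
  (d.find? (fun p => p.1 == k)).map (·.2)

def pvSubstParams (params : List (String × String)) (sql : String) : String :=
  params.foldl (fun s kv => PySem.Str.replace s ("{" ++ kv.1 ++ "}") kv.2) sql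

def select_sql_template_py (procedure : List (String × List (String × String))) (params : List (String × String)) : String :=
  let templates := ((procedure.find? (fun p => p.1 == "sql_template")).map (·.2)).getD []
  let state := (pvLookup params "state").getD "ALL"
  let month := (pvLookup params "month").getD "ALL"
  let sql :=
    if state == "ALL" then
      match pvLookup templates "all_states" with
      | some s => s
      | none =>
        match pvLookup templates "all_markets" with
        | some s => s
        | none =>
          match pvLookup templates "all_states_market" with
          | some s => s
          | none => (templates.map (·.2)).headD ""   -- list(templates.values())[0]; IndexError (templates = []) excluded by Pre_
    else if month != "ALL" && (pvLookup templates "by_state_and_month").isSome then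
      ((pvLookup templates "by_state_and_month").getD "")
    else
      match pvLookup templates "by_state_all_months" with
      | some s => s
      | none =>
        match pvLookup templates "by_state" with
        | some s => s
        | none =>
          match pvLookup templates "market_level_by_state" with
          | some s => s
          | none =>
            match pvLookup templates "ro_level_by_state" with
            | some s => s
            | none => (templates.map (·.2)).headD ""
  pvSubstParams params sql

-- ===== PORT B =====
-- rank.get(key) on the priority dict
def pvRankGet (rk : List (String × Nat)) (k : String) : Option Nat :=
  (rk.find? (fun p => k == p.1)).map (·.2)

def select_sql_template_py_alt (procedure : List (String × List (String × String))) (params : List (String × String)) : String :=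
  let templates := ((procedure.find? (fun p => p.1 == "sql_template")).map (·.2)).getD []
  let state := (pvLookup params "state").getD "ALL"
  let month := (pvLookup params "month").getD "ALL"
  let rank : List (String × Nat) :=
    if state == "ALL" then
      [("all_states", 0), ("all_markets", 1), ("all_states_market", 2)]
    else
      (if month != "ALL" then
        [("by_state_all_months", 1), ("by_state", 2),
         ("market_level_by_state", 3), ("ro_level_by_state", 4), ("by_state_and_month", 0)]
      else
        [("by_state_all_months", 1), ("by_state", 2),
         ("market_level_by_state", 3), ("ro_level_by_state", 4)])
  let best :=
    templates.foldl (fun acc kv =>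
      match pvRankGet rank kv.1 with
      | none => acc
      | some r =>
        match acc with
        | none => some (r, kv.2)
        | some b => if r < b.1 then some (r, kv.2) else acc) none
  let sql :=
    match best with
    | some b => b.2
    | none => (templates.map (·.2)).headD ""   -- next(iter(templates.values())); StopIteration (templates = []) excluded by Pre_
  pvSubstParams params sql

-- ===== PRECONDITION & SPEC =====
-- Pre_ excludes exactly the inputs where A raises: KeyError when "sql_template" is absent,
-- IndexError when the template dict is empty (B raises StopIteration there).
def Pre_select_sql_template_py (procedure : List (String × List (String × String))) (params : List (String × String)) : Prop :=
  ∃ ts, (procedure.find? (fun p => p.1 == "sql_template")) = some ("sql_template", ts) ∧ ts ≠ []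

instance (procedure : List (String × List (String × String))) (params : List (String × String)) : Decidable (Pre_select_sql_template_py procedure params) := by
  unfold Pre_select_sql_template_py
  rcases h : procedure.find? (fun p => p.1 == "sql_template") with _ | ⟨k, ts⟩
  · exact isFalse (by rintro ⟨ts, h1, _⟩; rw [h] at h1; cases h1)
  · by_cases hk : k = "sql_template" ∧ ts ≠ []
    · exact isTrue ⟨ts, by rw [h, hk.1], hk.2⟩
    · refine isFalse ?_
      rintro ⟨ts', h1, h2⟩
      rw [h] at h1
      cases h1
      exact hk ⟨rfl, h2⟩

def pvWitness_select_sql_template_py : (List (String × List (String × String))) × (List (String × String)) :=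
  ([("sql_template", [("by_state", "SELECT x WHERE s = {state}")])], [("state", "KS")])

def Spec_select_sql_template_py (procedure : List (String × List (String × String))) (params : List (String × String)) (out : String) : Prop := out = select_sql_template_py_alt procedure params
instance (procedure : List (String × List (String × String))) (params : List (String × String)) (out : String) : Decidable (Spec_select_sql_template_py procedure params out) := by unfold Spec_select_sql_template_py; infer_instance

-- ===== CLAIM (what is proved, stated in full; the proofs are below) =====
def Claim_equal_select_sql_template_py : Prop := ∀ (procedure : List (String × List (String × String))) (params : List (String × String)), Dom_select_sql_template_py procedure params → Pre_select_sql_template_py procedure params → Spec_select_sql_template_py procedure params (select_sql_template_py procedure params)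

-- ===== LEMMAS AND PROOFS =====

theorem pvLookup_cons (k v c : String) (ts : List (String × String)) :
    pvLookup ((k, v) :: ts) c = if k == c then some v else pvLookup ts c := by
  rcases h : k == c <;> simp [pvLookup, List.find?, h]

-- structural recursion computing the same (rank, value) as B's foldl min-rank pass
def pvBestR (rank : String → Option Nat) : List (String × String) → Option (Nat × String)
  | [] => none
  | kv :: ts =>
    match rank kv.1, pvBestR rank ts with
    | none, b => b
    | some r, none => some (r, kv.2)
    | some r, some b => if b.1 < r then some b else some (r, kv.2)

def pvMerge (a b : Option (Nat × String)) : Option (Nat × String) :=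
  match a, b with
  | none, b => b
  | some a, none => some a
  | some a, some b => if b.1 < a.1 then some b else some a

theorem pvMerge_assoc (a b c : Option (Nat × String)) :
    pvMerge (pvMerge a b) c = pvMerge a (pvMerge b c) := by
  rcases a with _ | ⟨ar, av⟩
  · rfl
  rcases b with _ | ⟨br, bv⟩
  · rfl
  rcases c with _ | ⟨cr, cv⟩
  · by_cases h1 : br < ar <;> simp [pvMerge, h1]
  · by_cases h1 : br < ar <;> by_cases h2 : cr < br <;> by_cases h3 : cr < ar <;>
      simp [pvMerge, h1, h2, h3] <;> exfalso <;> omega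

theorem pvBestR_cons (rank : String → Option Nat) (kv : String × String) (ts : List (String × String)) :
    pvBestR rank (kv :: ts) = pvMerge ((rank kv.1).map (fun r => (r, kv.2))) (pvBestR rank ts) := by
  rcases h : rank kv.1 with _ | r <;> rcases hb : pvBestR rank ts with _ | b <;>
    simp [pvBestR, pvMerge, h, hb]

theorem pvFold_eq_bestR (rank : String → Option Nat) (ts : List (String × String)) :
    ∀ acc, ts.foldl (fun acc kv =>
      match rank kv.1 with
      | none => acc
      | some r =>
        match acc with
        | none => some (r, kv.2)
        | some b => if r < b.1 then some (r, kv.2) else acc) acc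
      = pvMerge acc (pvBestR rank ts) := by
  induction ts with
  | nil => intro acc; rcases acc with _ | a <;> simp [pvBestR, pvMerge]
  | cons kv ts ih =>
    intro acc
    rw [List.foldl_cons, ih, pvBestR_cons, ← pvMerge_assoc]
    congr 1
    rcases h : rank kv.1 with _ | r <;> rcases acc with _ | b <;>
      simp [pvMerge, h]

-- per-configuration characterisation of the min-rank scan as the lookup cascade
theorem pvBestR_all (ts : List (String × String)) :
    pvBestR (pvRankGet [("all_states", 0), ("all_markets", 1), ("all_states_market", 2)]) ts
      = (match pvLookup ts "all_states" with
         | some s => some ((0 : Nat), s)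
         | none =>
           match pvLookup ts "all_markets" with
           | some s => some (1, s)
           | none =>
             match pvLookup ts "all_states_market" with
             | some s => some (2, s)
             | none => none) := by
  induction ts with
  | nil => simp [pvBestR, pvLookup]
  | cons kv ts ih =>
    rcases kv with ⟨k, v⟩
    rw [pvBestR_cons, ih]
    rcases e1 : k == "all_states" <;> rcases e2 : k == "all_markets" <;>
      rcases e3 : k == "all_states_market" <;>
      rcases l1 : pvLookup ts "all_states" with _ | s1 <;>
      rcases l2 : pvLookup ts "all_markets" with _ | s2 <;>
      rcases l3 : pvLookup ts "all_states_market" with _ | s3 <;>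
      simp [pvLookup_cons, pvRankGet, List.find?, pvMerge, e1, e2, e3, l1, l2, l3]

set_option maxHeartbeats 2000000 in
theorem pvBestR_month (ts : List (String × String)) :
    pvBestR (pvRankGet [("by_state_all_months", 1), ("by_state", 2),
        ("market_level_by_state", 3), ("ro_level_by_state", 4), ("by_state_and_month", 0)]) ts
      = (match pvLookup ts "by_state_and_month" with
         | some s => some ((0 : Nat), s)
         | none =>
           match pvLookup ts "by_state_all_months" with
           | some s => some (1, s)
           | none =>
             match pvLookup ts "by_state" with
             | some s => some (2, s)
             | none =>
               match pvLookup ts "market_level_by_state" with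
               | some s => some (3, s)
               | none =>
                 match pvLookup ts "ro_level_by_state" with
                 | some s => some (4, s)
                 | none => none) := by
  induction ts with
  | nil => simp [pvBestR, pvLookup]
  | cons kv ts ih =>
    rcases kv with ⟨k, v⟩
    rw [pvBestR_cons, ih]
    rcases e0 : k == "by_state_and_month" <;>
      rcases e1 : k == "by_state_all_months" <;> rcases e2 : k == "by_state" <;>
      rcases e3 : k == "market_level_by_state" <;> rcases e4 : k == "ro_level_by_state" <;>
      rcases l0 : pvLookup ts "by_state_and_month" with _ | s0 <;>
      rcases l1 : pvLookup ts "by_state_all_months" with _ | s1 <;>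
      rcases l2 : pvLookup ts "by_state" with _ | s2 <;>
      rcases l3 : pvLookup ts "market_level_by_state" with _ | s3 <;>
      rcases l4 : pvLookup ts "ro_level_by_state" with _ | s4 <;>
      simp [pvLookup_cons, pvRankGet, List.find?, pvMerge, e0, e1, e2, e3, e4, l0, l1, l2, l3, l4] <;>
      simp_all

set_option maxHeartbeats 1000000 in
theorem pvBestR_state (ts : List (String × String)) :
    pvBestR (pvRankGet [("by_state_all_months", 1), ("by_state", 2),
        ("market_level_by_state", 3), ("ro_level_by_state", 4)]) ts
      = (match pvLookup ts "by_state_all_months" with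
         | some s => some ((1 : Nat), s)
         | none =>
           match pvLookup ts "by_state" with
           | some s => some (2, s)
           | none =>
             match pvLookup ts "market_level_by_state" with
             | some s => some (3, s)
             | none =>
               match pvLookup ts "ro_level_by_state" with
               | some s => some (4, s)
               | none => none) := by
  induction ts with
  | nil => simp [pvBestR, pvLookup]
  | cons kv ts ih =>
    rcases kv with ⟨k, v⟩
    rw [pvBestR_cons, ih]
    rcases e1 : k == "by_state_all_months" <;> rcases e2 : k == "by_state" <;>
      rcases e3 : k == "market_level_by_state" <;> rcases e4 : k == "ro_level_by_state" <;>
      rcases l1 : pvLookup ts "by_state_all_months" with _ | s1 <;>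
      rcases l2 : pvLookup ts "by_state" with _ | s2 <;>
      rcases l3 : pvLookup ts "market_level_by_state" with _ | s3 <;>
      rcases l4 : pvLookup ts "ro_level_by_state" with _ | s4 <;>
      simp [pvLookup_cons, pvRankGet, List.find?, pvMerge, e1, e2, e3, e4, l1, l2, l3, l4]

-- ===== VERDICT (by name: the statement is the Claim_ definition above) =====
theorem select_sql_template_py_spec : Claim_equal_select_sql_template_py := by
  intro procedure params _ _
  unfold Spec_select_sql_template_py select_sql_template_py select_sql_template_py_alt
  refine congrArg (pvSubstParams params) ?_
  set templates := ((procedure.find? (fun p => p.1 == "sql_template")).map (·.2)).getD [] with htpl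
  by_cases hs : ((pvLookup params "state").getD "ALL") == "ALL"
  · simp only [hs, if_true, pvFold_eq_bestR, pvMerge, pvBestR_all]
    rcases pvLookup templates "all_states" with _ | s <;>
      rcases pvLookup templates "all_markets" with _ | s <;>
      rcases pvLookup templates "all_states_market" with _ | s <;> simp
  · by_cases hm : ((pvLookup params "month").getD "ALL") != "ALL"
    · simp only [hs, hm, Bool.false_eq_true, ite_false, ite_true, Bool.true_and,
        pvFold_eq_bestR, pvMerge, pvBestR_month]
      rcases pvLookup templates "by_state_and_month" with _ | s <;>
        rcases pvLookup templates "by_state_all_months" with _ | s <;>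
        rcases pvLookup templates "by_state" with _ | s <;>
        rcases pvLookup templates "market_level_by_state" with _ | s <;>
        rcases pvLookup templates "ro_level_by_state" with _ | s <;> simp
    · simp only [hs, Bool.not_eq_true] at *
      simp only [hm, Bool.false_eq_true, ite_false, Bool.false_and,
        pvFold_eq_bestR, pvMerge, pvBestR_state]
      rcases pvLookup templates "by_state_all_months" with _ | s <;>
        rcases pvLookup templates "by_state" with _ | s <;>
        rcases pvLookup templates "market_level_by_state" with _ | s <;>
        rcases pvLookup templates "ro_level_by_state" with _ | s <;> simp
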